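-- pv_equiv track=rewrite | github.com/Minh320/Minh | code thcs/32_Hà_Quang_Minh_THCS/Bai19.py | nhom_sinh_vien_theo_diem
-- ===== SOURCE A (Python) =====
-- def nhom_sinh_vien_theo_diem(d):
--     ket_qua = {}
--     for ten in d:
--         diem = d[ten]
--         if diem in ket_qua:
--             ket_qua[diem].append(ten)
--         else:
--             ket_qua[diem] = [ten]
--     return ket_qua
-- ===== SOURCE B (Python) =====
-- def nhom_sinh_vien_theo_diem(d):
--     scores = list(dict.fromkeys(d.values()))
--     return {s: [ten for ten, diem in d.items() if diem == s] for s in scores}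
-- ===== Notes on version B (the rewrite author's own statement) =====
-- stated objective: alternative
-- what changed: Replaces the online dict-insertion pass (lookup each score, append or create a bucket) with a two-phase decomposition: first dedup the scores in first-occurrence order via dict.fromkeys, then build each group with one comprehension per score.
import Mathlib
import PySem

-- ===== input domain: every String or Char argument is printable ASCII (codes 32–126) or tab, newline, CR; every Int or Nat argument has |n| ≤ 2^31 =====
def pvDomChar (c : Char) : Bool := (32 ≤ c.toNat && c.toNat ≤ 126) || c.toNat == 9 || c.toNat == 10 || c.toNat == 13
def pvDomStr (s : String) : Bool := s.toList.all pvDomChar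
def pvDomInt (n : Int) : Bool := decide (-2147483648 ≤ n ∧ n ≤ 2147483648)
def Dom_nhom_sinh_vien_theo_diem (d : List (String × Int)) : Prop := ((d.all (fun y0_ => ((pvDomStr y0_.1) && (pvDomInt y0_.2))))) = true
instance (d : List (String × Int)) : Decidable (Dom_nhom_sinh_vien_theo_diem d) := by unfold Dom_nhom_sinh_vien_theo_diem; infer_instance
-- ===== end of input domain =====

-- B replaces A's online dict-insertion pass by "dedup the scores, then one comprehension per score" (alternative decomposition, not faster).

-- ===== PORT A =====
-- for ten in d: diem = d[ten]; if diem in ket_qua: ket_qua[diem].append(ten) else: ket_qua[diem] = [ten]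
-- (iterating a dict's keys = iterating the pairs' first components; d[ten] = first-match lookup in d)
def nhom_sinh_vien_theo_diem (d : List (String × Int)) : List (Int × List String) :=
  (d.foldl (fun ket_qua p =>
      match PySem.Dict.get? (PySem.Dict.mk d) p.1 with
      | some diem =>
          if ket_qua.contains diem then ket_qua.modify diem [] (fun l => l ++ [p.1])
          else ket_qua.insert diem [p.1]
      | none => ket_qua)   -- unreachable: ten comes from d itself
    (PySem.Dict.empty : PySem.Dict Int (List String))).items

-- ===== PORT B =====
-- scores = list(dict.fromkeys(d.values())); {s: [ten for ten, diem in d.items() if diem == s] for s in scores}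
def nhom_sinh_vien_theo_diem_alt (d : List (String × Int)) : List (Int × List String) :=
  (PySem.List.dedup (d.map Prod.snd)).map
    (fun s => (s, (d.filter (fun p => p.2 == s)).map Prod.fst))

-- ===== PRECONDITION & SPEC =====
-- Pre_ excludes association lists with duplicate names: a Python dict argument cannot contain
-- duplicate keys, so such lists represent no Python input at all.
def Pre_nhom_sinh_vien_theo_diem (d : List (String × Int)) : Prop := (d.map Prod.fst).Nodup
instance (d : List (String × Int)) : Decidable (Pre_nhom_sinh_vien_theo_diem d) := by
  unfold Pre_nhom_sinh_vien_theo_diem; infer_instance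
def pvWitness_nhom_sinh_vien_theo_diem : (List (String × Int)) := [("an", 8), ("binh", 7), ("chi", 8)]
def Spec_nhom_sinh_vien_theo_diem (d : List (String × Int)) (out : List (Int × List String)) : Prop := out = nhom_sinh_vien_theo_diem_alt d
instance (d : List (String × Int)) (out : List (Int × List String)) : Decidable (Spec_nhom_sinh_vien_theo_diem d out) := by unfold Spec_nhom_sinh_vien_theo_diem; infer_instance

-- ===== CLAIM (what is proved, stated in full; the proofs are below) =====
def Claim_equal_nhom_sinh_vien_theo_diem : Prop := ∀ (d : List (String × Int)), Dom_nhom_sinh_vien_theo_diem d → Pre_nhom_sinh_vien_theo_diem d → Spec_nhom_sinh_vien_theo_diem d (nhom_sinh_vien_theo_diem d)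

-- ===== LEMMAS AND PROOFS =====

-- With distinct names, looking p.1 up in d returns p's own score.
theorem pv_get_self (d : List (String × Int)) (hnd : (d.map Prod.fst).Nodup)
    (p : String × Int) (hp : p ∈ d) :
    PySem.Dict.get? (PySem.Dict.mk d) p.1 = some p.2 := by
  exact PySem.Dict.get?_of_mem_items (d := PySem.Dict.mk d) hp hnd

-- When the key is absent, modify-with-default is an insert of f applied to the default.
theorem pv_modify_not_contains {κ ν : Type} [BEq κ] (d : PySem.Dict κ ν) (k : κ) (d0 : ν) (f : ν → ν)
    (h : d.contains k = false) : d.modify k d0 f = d.insert k (f d0) := by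
  simp only [PySem.Dict.modify]
  rw [PySem.Dict.getD_of_not_contains d d0 h]

-- A's branching step is exactly a modify-with-default step.
theorem pv_step_eq_modify (kq : PySem.Dict Int (List String)) (diem : Int) (ten : String) :
    (if kq.contains diem then kq.modify diem [] (fun l => l ++ [ten])
     else kq.insert diem [ten]) = kq.modify diem [] (fun l => l ++ [ten]) := by
  by_cases h : kq.contains diem = true
  · simp [h]
  · simp only [Bool.not_eq_true] at h
    simp [h, pv_modify_not_contains kq diem [] _ h]

theorem pv_fold_eq (d : List (String × Int)) (hnd : (d.map Prod.fst).Nodup) :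
    (d.foldl (fun ket_qua p =>
        match PySem.Dict.get? (PySem.Dict.mk d) p.1 with
        | some diem =>
            if ket_qua.contains diem then ket_qua.modify diem [] (fun l => l ++ [p.1])
            else ket_qua.insert diem [p.1]
        | none => ket_qua)
      (PySem.Dict.empty : PySem.Dict Int (List String)))
    = (d.map Prod.swap).foldl (fun kq q => kq.modify q.1 [] (fun l => l ++ [q.2]))
        (PySem.Dict.empty : PySem.Dict Int (List String)) := by
  rw [List.foldl_map]
  apply PySem.List.foldl_congr_mem
  intro kq p hp
  rw [pv_get_self d hnd p hp]
  exact pv_step_eq_modify kq p.2 p.1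

-- ===== VERDICT (by name: the statement is the Claim_ definition above) =====
theorem nhom_sinh_vien_theo_diem_spec : Claim_equal_nhom_sinh_vien_theo_diem := by
  intro d _ hpre
  unfold Spec_nhom_sinh_vien_theo_diem nhom_sinh_vien_theo_diem nhom_sinh_vien_theo_diem_alt
  rw [pv_fold_eq d hpre]
  set R := (d.map Prod.swap).foldl (fun kq q => kq.modify q.1 [] (fun l => l ++ [q.2]))
      (PySem.Dict.empty : PySem.Dict Int (List String)) with hR
  have hkeysnd : R.keys.Nodup := by
    rw [hR]
    have := PySem.Dict.nodup_keys_foldl_modify_key (d.map Prod.swap) (fun q => q.1) []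
      (fun _ q => (fun l => l ++ [q.2])) (PySem.Dict.empty : PySem.Dict Int (List String))
      PySem.Dict.nodup_keys_empty
    simpa using this
  rw [PySem.Dict.items_eq_map_keys R hkeysnd []]
  have hkeys : R.keys = PySem.List.dedup (d.map Prod.snd) := by
    rw [hR]
    have := PySem.Dict.keys_foldl_modify_key (l := d.map Prod.swap) (key := fun q => q.1)
      (d0 := []) (f := fun _ q => (fun l => l ++ [q.2]))
      (d := (PySem.Dict.empty : PySem.Dict Int (List String)))
    simp only [this, PySem.Dict.keys_empty, PySem.Set.update_nil_left]
    simp [List.map_map, Function.comp_def, Prod.swap]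
  rw [hkeys]
  apply List.map_congr_left
  intro s _
  have hg : R.getD s [] = (d.filter (fun p => p.2 == s)).map Prod.fst := by
    rw [hR, PySem.Dict.getD_foldl_modify_append]
    simp only [PySem.Dict.getD_empty, List.nil_append]
    rw [List.filter_map, List.map_map]
    simp [Function.comp_def, Prod.swap]
  rw [hg]
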